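-- pv_equiv track=rewrite | github.com/shekharupadhyay/cs580-query-project | code/problem2_yannakakis.py | forward_semijoin
-- ===== SOURCE A (Python) =====
-- from typing import List, Tuple
--
-- Tuple2 = Tuple[int, int]
--
-- def forward_semijoin(relations: List[List[Tuple2]]) -> List[List[Tuple2]]:
--
--     k = len(relations)
--     # Make a copy to avoid mutating input directly
--     R = [list(rel) for rel in relations]
--
--
--     for i in range(k - 2, -1, -1):
--         right = R[i + 1]
--         # Collect the set of valid join keys from right's first attribute
--         valid_keys = {t[0] for t in right}  # A_{i+1} from R_{i+1}
--         # Filter R_i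
--         left = R[i]
--         R[i] = [t for t in left if t[1] in valid_keys]  # keep tuples whose A_{i+1} is in valid_keys
--
--     return R
-- ===== SOURCE B (Python) =====
-- def _live_sets(rels):
--     # Recursively compute, for each relation, the set of keys (first components)
--     # that survive the whole downstream chain -- derived from the ORIGINAL
--     # relations only, no filtered intermediates.
--     if not rels:
--         return []
--     rest = _live_sets(rels[1:])
--     head = rels[0]
--     if rest:
--         s = {a for (a, b) in head if b in rest[0]}
--     else:
--         s = {a for (a, b) in head}
--     return [s] + rest
--
-- def forward_semijoin(relations):
--     # Stage 1: live-key sets per relation (recursive, over unfiltered input).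
--     live = _live_sets(relations)
--     # Stage 2: filter each relation against its right neighbour's live set;
--     # the last relation (paired with None) is copied as-is.
--     nexts = live[1:] + [None]
--     return [list(rel) if s is None else [t for t in rel if t[1] in s]
--             for rel, s in zip(relations, nexts)]
-- ===== Notes on version B (the rewrite author's own statement) =====
-- stated objective: alternative
-- what changed: Replaces A's single in-place descending-index loop (which filters each relation and re-derives valid_keys from the already-filtered R[i+1]) with two staged passes: a recursive helper computes each relation's live-key set directly from the unfiltered input relations, then one zip pass filters each relation against its right neighbour's precomputed live set, so no filtered intermediate is ever consulted and no index arithmetic or in-place mutation occurs.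
import Mathlib
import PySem

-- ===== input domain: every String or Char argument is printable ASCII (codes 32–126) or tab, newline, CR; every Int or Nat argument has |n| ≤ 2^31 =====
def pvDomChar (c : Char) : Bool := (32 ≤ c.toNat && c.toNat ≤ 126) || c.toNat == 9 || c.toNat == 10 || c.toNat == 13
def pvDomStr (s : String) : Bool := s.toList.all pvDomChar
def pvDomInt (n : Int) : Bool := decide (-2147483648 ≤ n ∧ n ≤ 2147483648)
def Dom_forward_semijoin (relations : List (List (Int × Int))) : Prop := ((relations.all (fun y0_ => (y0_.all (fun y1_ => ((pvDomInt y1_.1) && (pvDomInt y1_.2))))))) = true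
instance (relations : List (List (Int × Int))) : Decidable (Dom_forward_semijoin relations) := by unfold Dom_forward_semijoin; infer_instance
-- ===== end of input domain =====

-- B replaces A's in-place descending-index loop with two staged passes: a recursive
-- computation of per-relation live-key sets from the unfiltered input, then one zip/filter
-- pass producing the output (objective: alternative; same asymptotic cost).


-- ===== PORT A =====
-- the body of A's "for i in range(k-2, -1, -1)" loop
def fsjAStep (R : List (List (Int × Int))) (i : Int) : List (List (Int × Int)) :=
  let right := PySem.List.pyGetD R (i + 1) []     -- R[i+1]; i+1 is always in range here
  let valid_keys := PySem.Set.ofList (right.map (fun t => t.1))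
  let left := PySem.List.pyGetD R i []
  PySem.List.pySetD R i (left.filter (fun t => PySem.Set.contains valid_keys t.2))

def forward_semijoin (relations : List (List (Int × Int))) : List (List (Int × Int)) :=
  let k : Int := relations.length
  let R := relations.map (fun rel => rel)    -- R = [list(rel) for rel in relations]
  (PySem.List.pyRange (k - 2) (-1) (-1)).foldl fsjAStep R

-- ===== PORT B =====
-- _live_sets: recursive pass computing the live-key set of each relation from the original input
def fsjLive : List (List (Int × Int)) → List (PySem.Set Int)
  | [] => []
  | head :: tail =>
    let rest := fsjLive tail
    let s := match rest with
      | [] => PySem.Set.ofList (head.map (fun t => t.1))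
      | r0 :: _ => PySem.Set.ofList ((head.filter (fun t => PySem.Set.contains r0 t.2)).map (fun t => t.1))
    s :: rest

def forward_semijoin_alt (relations : List (List (Int × Int))) : List (List (Int × Int)) :=
  let live := fsjLive relations
  let nexts := (live.drop 1).map some ++ [none]   -- live[1:] + [None]
  (relations.zip nexts).map (fun p =>
    match p.2 with
    | none => p.1
    | some s => p.1.filter (fun t => PySem.Set.contains s t.2))

-- ===== PRECONDITION & SPEC =====
def Spec_forward_semijoin (relations : List (List (Int × Int))) (out : List (List (Int × Int))) : Prop := out = forward_semijoin_alt relations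
instance (relations : List (List (Int × Int))) (out : List (List (Int × Int))) : Decidable (Spec_forward_semijoin relations out) := by unfold Spec_forward_semijoin; infer_instance

-- ===== CLAIM (what is proved, stated in full; the proofs are below) =====
def Claim_equal_forward_semijoin : Prop := ∀ (relations : List (List (Int × Int))), Dom_forward_semijoin relations → Spec_forward_semijoin relations (forward_semijoin relations)

-- ===== LEMMAS AND PROOFS =====

-- abstract description of the whole semijoin chain: Fspec rs = (valid-keys set carried
-- leftwards after consuming the suffix rs, the filtered suffix)
def Fspec : List (List (Int × Int)) → Option (PySem.Set Int) × List (List (Int × Int))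
  | [] => (none, [])
  | r :: rs =>
    let st := Fspec rs
    let filtered := match st.1 with
      | none => r
      | some ks => r.filter (fun t => PySem.Set.contains ks t.2)
    (some (PySem.Set.ofList (filtered.map (fun t => t.1))), filtered :: st.2)

def fsjKeys (l : List (Int × Int)) : PySem.Set Int := PySem.Set.ofList (l.map (fun t => t.1))

-- B's stage-1 sets are exactly the key sets of the filtered suffix
lemma fsjLive_spec (rs : List (List (Int × Int))) :
    fsjLive rs = (Fspec rs).2.map fsjKeys := by
  induction rs with
  | nil => rfl
  | cons r rs ih =>
    cases rs with
    | nil => rfl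
    | cons r' rs' =>
      show (match fsjLive (r' :: rs') with
        | [] => PySem.Set.ofList (r.map (fun t => t.1))
        | r0 :: _ => PySem.Set.ofList ((r.filter (fun t => PySem.Set.contains r0 t.2)).map (fun t => t.1)))
          :: fsjLive (r' :: rs') = _
      rw [ih]
      rfl

-- B computes the filtered suffix
lemma alt_eq_Fspec (rs : List (List (Int × Int))) :
    forward_semijoin_alt rs = (Fspec rs).2 := by
  induction rs with
  | nil => rfl
  | cons r rs ih =>
    cases rs with
    | nil => rfl
    | cons r' rs' =>
      have hl := fsjLive_spec (r' :: rs')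
      unfold forward_semijoin_alt
      show ((r :: r' :: rs').zip (((fsjLive (r :: r' :: rs')).drop 1).map some ++ [none])).map _ = _
      have hcons : fsjLive (r :: r' :: rs') = (match fsjLive (r' :: rs') with
        | [] => PySem.Set.ofList (r.map (fun t => t.1))
        | r0 :: _ => PySem.Set.ofList ((r.filter (fun t => PySem.Set.contains r0 t.2)).map (fun t => t.1)))
          :: fsjLive (r' :: rs') := rfl
      rw [hcons, List.drop_one, List.tail_cons, hl]
      show ((r, some (fsjKeys (Fspec (r' :: rs')).2.head!)) ::
          (r' :: rs').zip (((Fspec (r' :: rs')).2.map fsjKeys).tail.map some ++ [none])).map _ = _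
      rw [List.map_cons]
      have htail : ((r' :: rs').zip ((((Fspec (r' :: rs')).2.map fsjKeys).tail).map some ++ [none])).map
          (fun p => match p.2 with
            | none => p.1
            | some s => p.1.filter (fun t => PySem.Set.contains s t.2)) = (Fspec (r' :: rs')).2 := by
        have h2 : (((Fspec (r' :: rs')).2.map fsjKeys).tail).map some ++ [(none : Option (PySem.Set Int))]
            = ((fsjLive (r' :: rs')).drop 1).map some ++ [none] := by
          rw [hl, List.drop_one]
        rw [h2]
        exact ih
      rw [htail]
      rfl

-- the filtered version of a w.r.t. the keys of b
def fsjFilt (a b : List (Int × Int)) : List (Int × Int) :=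
  a.filter (fun t => PySem.Set.contains (PySem.Set.ofList (b.map (fun t => t.1))) t.2)

lemma Fspec_snoc2 (xs : List (List (Int × Int))) (a b : List (Int × Int)) :
    Fspec (xs ++ [a, b]) =
      ((Fspec (xs ++ [fsjFilt a b])).1, (Fspec (xs ++ [fsjFilt a b])).2 ++ [b]) := by
  induction xs with
  | nil => simp [Fspec, fsjFilt]
  | cons x xs ih => simp [Fspec, ih]

lemma fsjAStep_main (n : Nat) (R : List (List (Int × Int))) (h : n + 1 ≤ R.length) :
    (PySem.List.pyRange ((n : Int) - 1) (-1) (-1)).foldl fsjAStep R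
      = (Fspec (R.take (n + 1))).2 ++ R.drop (n + 1) := by
  induction n generalizing R with
  | zero =>
    rw [PySem.List.pyRange_neg_one_eq_nil (by omega)]
    obtain ⟨r, rs, rfl⟩ : ∃ r rs, R = r :: rs := by
      cases R with
      | nil => simp at h
      | cons r rs => exact ⟨r, rs, rfl⟩
    simp [List.foldl_nil, Fspec]
  | succ n ih =>
    have hn1 : n + 1 < R.length := by omega
    have hn : n < R.length := by omega
    rw [show ((n + 1 : Nat) : Int) - 1 = (n : Int) by push_cast; ring,
        PySem.List.pyRange_neg_one_cons (by omega), List.foldl_cons]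
    have hstep : fsjAStep R (n : Int) = R.set n (fsjFilt (R[n]'hn) (R[n+1]'hn1)) := by
      simp only [fsjAStep, fsjFilt]
      rw [show ((n : Int) + 1) = ((n + 1 : Nat) : Int) by push_cast; ring,
          PySem.List.pyGetD_natCast, PySem.List.pyGetD_natCast, PySem.List.pySetD_natCast,
          List.getD_eq_getElem _ _ hn1, List.getD_eq_getElem _ _ hn]
    rw [hstep, ih _ (by simp; omega)]
    have htake : (R.set n (fsjFilt (R[n]'hn) (R[n+1]'hn1))).take (n + 1)
        = R.take n ++ [fsjFilt (R[n]'hn) (R[n+1]'hn1)] := by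
      rw [List.take_add_one, List.take_set, List.getElem?_set_self (by simpa using hn)]
      simp only [Option.toList_some]
      rw [List.set_eq_of_length_le (by simp)]
    have hdrop : (R.set n (fsjFilt (R[n]'hn) (R[n+1]'hn1))).drop (n + 1)
        = (R[n+1]'hn1) :: R.drop (n + 1 + 1) := by
      rw [List.drop_set, if_pos (by omega : n < n + 1), List.drop_eq_getElem_cons hn1]
    have htake2 : R.take (n + 1 + 1) = R.take n ++ [R[n]'hn, R[n+1]'hn1] := by
      rw [List.take_add_one, List.take_add_one, List.getElem?_eq_getElem hn,
          List.getElem?_eq_getElem hn1]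
      simp only [Option.toList_some, List.append_assoc, List.singleton_append]
    rw [htake, hdrop, htake2, Fspec_snoc2 (R.take n) (R[n]'hn) (R[n+1]'hn1)]
    simp

-- ===== VERDICT (by name: the statement is the Claim_ definition above) =====
theorem forward_semijoin_spec : Claim_equal_forward_semijoin := by
  intro relations _
  unfold Spec_forward_semijoin forward_semijoin
  rw [alt_eq_Fspec]
  simp only [List.map_id']
  cases hR : relations with
  | nil => rw [show PySem.List.pyRange (([] : List (List (Int × Int))).length - 2) (-1) (-1) = [] from rfl]; rfl
  | cons r rs =>
    have hlen : 1 ≤ relations.length := by rw [hR]; simp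
    rw [← hR]
    have := fsjAStep_main (relations.length - 1) relations (by omega)
    rw [show ((relations.length : Int) - 2) = (((relations.length - 1 : Nat) : Int) - 1) by omega, this]
    rw [show relations.length - 1 + 1 = relations.length by omega]
    simp
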